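-- pv_equiv track=rewrite | github.com/Leipzig-Corpora-Collection/lcc-nlp-python | src/lcc/segmentizer.py | str_hash
-- ===== SOURCE A (Python) =====
-- def str_hash(text: str) -> int:
--     """Calculates the hash value for a given string.
--
--     The algorithm uses every character up to strings with 15 chars. For
--     larger strings the first 15 chars added by a maximum of 16 other chars
--     equally distributed over the rest of the string are used. (algorithm was
--     taken from JDK 1.1 but changed (T.Boehme))
--     """
--     #: hash value
--     h = 0
--     #: current character in string
--     off = 0
--     #: calculate hash for the first 15 characters
--     tmpLen = min(len(text), 15)
--     for _ in range(tmpLen, 0, -1):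
--         h = (h * 37) + ord(text[off])
--         h = h & 0xFFFFFFFF
--         h = (h ^ 0x80000000) - 0x80000000
--         off += 1
--     #: process the rest of the string
--     if len(text) >= 16:
--         #: only sample some characters from rest
--         skip = len(text) // 16
--         for _ in range(len(text), 15, -skip):
--             h = (h * 39) + ord(text[off])
--             h = h & 0xFFFFFFFF
--             h = (h ^ 0x80000000) - 0x80000000
--             off += skip
--     return abs(h)
-- ===== SOURCE B (Python) =====
-- def str_hash(text: str) -> int:
--     """Polynomial form of the bounded hash: accumulate the exact polynomial
--     value back-to-front with a running power, then mask and sign-fold once."""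
--     n = len(text)
--     if n >= 16:
--         skip = n // 16
--         sel = [(text[15 + i * skip], 39) for i in range(len(range(n, 15, -skip)))]
--     else:
--         sel = []
--     sel = [(c, 37) for c in text[:15]] + sel
--     u = 0
--     p = 1
--     for c, m in reversed(sel):
--         u += ord(c) * p
--         p *= m
--     u %= 1 << 32
--     if u >= 1 << 31:
--         u -= 1 << 32
--     return abs(u)
-- ===== Notes on version B (the rewrite author's own statement) =====
-- stated objective: alternative
-- what changed: A is a forward rolling hash that masks to 32 bits and sign-folds after every character while walking an offset; B instead evaluates the exact (unbounded) polynomial over the selected characters back-to-front with a running power of the multipliers, and applies the 32-bit mask and signed wrap once at the end — correct because masking commutes with the ring operations mod 2^32.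
import Mathlib
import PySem

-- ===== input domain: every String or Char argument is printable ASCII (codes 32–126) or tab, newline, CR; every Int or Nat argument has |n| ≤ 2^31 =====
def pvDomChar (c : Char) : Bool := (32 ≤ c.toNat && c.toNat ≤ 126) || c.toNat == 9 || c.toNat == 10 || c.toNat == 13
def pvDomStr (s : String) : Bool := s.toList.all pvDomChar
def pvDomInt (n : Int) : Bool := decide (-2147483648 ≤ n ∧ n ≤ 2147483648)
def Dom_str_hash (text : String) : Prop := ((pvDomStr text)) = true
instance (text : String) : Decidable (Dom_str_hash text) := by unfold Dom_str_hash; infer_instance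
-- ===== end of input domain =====

-- B replaces A's forward rolling hash (32-bit mask and sign-fold after every character) by a
-- back-to-front accumulation of the exact polynomial value with a running power, masked once at
-- the end (objective: alternative algorithm; return value only, no side effects involved).

-- ===== PORT A =====
-- Literal port of A: two counting loops threading (h, off); pyGetD's default is never used (off stays in range).
def str_hash (text : String) : Int :=
  let cs := text.toList
  let n : Int := PySem.List.len cs
  let tmpLen : Int := min n 15
  let s1 : Int × Int :=
    (PySem.List.pyRange tmpLen 0 (-1)).foldl
      (fun (s : Int × Int) _ =>
        (PySem.Int.bxor
            (PySem.Int.band (s.1 * 37 + ((PySem.List.pyGetD cs s.2 ' ').toNat : Int)) 4294967295)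
            2147483648 - 2147483648,
         s.2 + 1)) (0, 0)
  let s2 : Int × Int :=
    if n ≥ 16 then
      let skip := PySem.Int.floordiv n 16
      (PySem.List.pyRange n 15 (-skip)).foldl
        (fun (s : Int × Int) _ =>
          (PySem.Int.bxor
              (PySem.Int.band (s.1 * 39 + ((PySem.List.pyGetD cs s.2 ' ').toNat : Int)) 4294967295)
              2147483648 - 2147483648,
           s.2 + skip)) s1
    else s1
  |s2.1|

-- ===== PORT B =====
-- Literal port of B (Source B): build the selected (char, multiplier) list, fold it IN REVERSE with a
-- running power (exact integer arithmetic, no masking), then mask and sign-fold once and take abs.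
def str_hash_alt (text : String) : Int :=
  let cs := text.toList
  let n : Int := PySem.List.len cs
  let sel0 : List (Char × Int) :=
    if n ≥ 16 then
      let skip := PySem.Int.floordiv n 16
      (List.range (PySem.List.pyRange n 15 (-skip)).length).map
        (fun (i : Nat) => (PySem.List.pyGetD cs (15 + (i : Int) * skip) ' ', (39 : Int)))
    else []
  let sel : List (Char × Int) :=
    (PySem.List.slice cs none (some 15)).map (fun c => (c, (37 : Int))) ++ sel0
  let up : Int × Int :=
    sel.reverse.foldl (fun (s : Int × Int) q => (s.1 + ((q.1).toNat : Int) * s.2, s.2 * q.2)) (0, 1)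
  let u : Int := PySem.Int.mod up.1 4294967296
  let u' : Int := if u ≥ 2147483648 then u - 4294967296 else u
  |u'|

-- ===== PRECONDITION & SPEC =====
def Spec_str_hash (text : String) (out : Int) : Prop := out = str_hash_alt text
instance (text : String) (out : Int) : Decidable (Spec_str_hash text out) := by unfold Spec_str_hash; infer_instance

-- ===== CLAIM (what is proved, stated in full; the proofs are below) =====
def Claim_equal_str_hash : Prop := ∀ (text : String), Dom_str_hash text → Spec_str_hash text (str_hash text)

-- ===== LEMMAS AND PROOFS =====

-- A's per-character step, named for the proofs.
def pvStep (h : Int) (p : Char × Int) : Int :=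
  PySem.Int.bxor (PySem.Int.band (h * p.2 + ((p.1).toNat : Int)) 4294967295) 2147483648 - 2147483648

-- x reduced to the signed 32-bit representative of its class mod 2^32.
def pvSgn (v : Int) : Int :=
  if v % 4294967296 ≥ 2147483648 then v % 4294967296 - 4294967296 else v % 4294967296

-- product of the multipliers / the polynomial value of a (char, multiplier) list.
def pvProd : List (Char × Int) → Int
  | [] => 1
  | p :: l => p.2 * pvProd l

def pvPoly : List (Char × Int) → Int
  | [] => 0
  | p :: l => ((p.1).toNat : Int) * pvProd l + pvPoly l

lemma pv_band_mask (x : Int) : PySem.Int.band x 4294967295 = x % 4294967296 := by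
  unfold PySem.Int.band
  by_cases hx : 0 ≤ x
  · rw [if_pos hx, if_pos (by norm_num : (0:Int) ≤ 4294967295)]
    have : x.toNat &&& (4294967295 : Int).toNat = x.toNat % 2 ^ 32 := by
      have := Nat.and_two_pow_sub_one_eq_mod x.toNat 32
      simpa using this
    rw [this]
    have hx' : ((x.toNat : Int)) = x := Int.toNat_of_nonneg hx
    push_cast
    omega
  · rw [if_neg hx, if_pos (by norm_num : (0:Int) ≤ 4294967295)]
    have h1 : (4294967295 : Int).toNat &&& (-x - 1).toNat = (-x - 1).toNat % 2 ^ 32 := by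
      rw [Nat.and_comm]
      have := Nat.and_two_pow_sub_one_eq_mod (-x - 1).toNat 32
      simpa using this
    rw [h1]
    have hy : ((-x - 1).toNat : Int) = -x - 1 := Int.toNat_of_nonneg (by omega)
    have hm : (-x - 1).toNat % 2 ^ 32 < 2 ^ 32 := Nat.mod_lt _ (by norm_num)
    have hcast : (((-x - 1).toNat % 2 ^ 32 : Nat) : Int) = (-x - 1) % 4294967296 := by
      push_cast [hy]
      norm_num
    push_cast [hcast] at *
    omega

lemma pv_xor31 (u : Int) (h0 : 0 ≤ u) (h1 : u < 4294967296) :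
    PySem.Int.bxor u 2147483648 = if u ≥ 2147483648 then u - 2147483648 else u + 2147483648 := by
  unfold PySem.Int.bxor
  rw [if_pos h0, if_pos (by norm_num : (0:Int) ≤ 2147483648)]
  have hq : u.toNat / 2 ^ 31 < 2 := by omega
  have hdiv : (u.toNat ^^^ (2147483648 : Int).toNat) / 2 ^ 31
      = u.toNat / 2 ^ 31 ^^^ 1 := by
    have := Nat.xor_div_two_pow (n := 31) (a := u.toNat) (b := (2147483648 : Int).toNat)
    simpa using this
  have hmod : (u.toNat ^^^ (2147483648 : Int).toNat) % 2 ^ 31 = u.toNat % 2 ^ 31 := by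
    have := Nat.xor_mod_two_pow (n := 31) (a := u.toNat) (b := (2147483648 : Int).toNat)
    simpa using this
  have hval : u.toNat ^^^ (2147483648 : Int).toNat
      = 2 ^ 31 * (u.toNat / 2 ^ 31 ^^^ 1) + u.toNat % 2 ^ 31 := by
    conv_lhs => rw [← Nat.div_add_mod (u.toNat ^^^ (2147483648 : Int).toNat) (2 ^ 31)]
    rw [hdiv, hmod]
  rw [hval]
  interval_cases h : u.toNat / 2 ^ 31
  · have : u.toNat < 2 ^ 31 := by omega
    rw [if_neg (by omega)]
    push_cast
    omega
  · have : 2 ^ 31 ≤ u.toNat := by omega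
    rw [if_pos (by omega)]
    push_cast
    omega

lemma pv_step_sgn (x : Int) :
    PySem.Int.bxor (PySem.Int.band x 4294967295) 2147483648 - 2147483648 = pvSgn x := by
  rw [pv_band_mask]
  have h0 : 0 ≤ x % 4294967296 := Int.emod_nonneg x (by norm_num)
  have h1 : x % 4294967296 < 4294967296 := Int.emod_lt_of_pos x (by norm_num)
  rw [pv_xor31 _ h0 h1]
  unfold pvSgn
  split_ifs with h <;> omega

lemma pvStep_eq (h : Int) (p : Char × Int) : pvStep h p = pvSgn (h * p.2 + ((p.1).toNat : Int)) :=
  pv_step_sgn _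

lemma pvSgn_mod (v : Int) : pvSgn v % 4294967296 = v % 4294967296 := by
  unfold pvSgn; split_ifs with h <;> omega

lemma pvSgn_congr (a b : Int) (h : a % 4294967296 = b % 4294967296) : pvSgn a = pvSgn b := by
  unfold pvSgn; rw [h]

lemma pvSgn_zero : pvSgn 0 = 0 := by decide

-- A's masked Horner fold computes the sign-folded value of the exact polynomial.
lemma pv_fold_sgn : ∀ (l : List (Char × Int)) (a : Int),
    l.foldl pvStep (pvSgn a) = pvSgn (a * pvProd l + pvPoly l) := by
  intro l
  induction l with
  | nil => intro a; simp [pvProd, pvPoly]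
  | cons q l ih =>
      intro a
      rw [List.foldl_cons, pvStep_eq, ih (pvSgn a * q.2 + ((q.1).toNat : Int))]
      apply pvSgn_congr
      have h1 : pvSgn a ≡ a [ZMOD (4294967296 : Int)] := pvSgn_mod a
      have h2 : pvSgn a * q.2 + ((q.1).toNat : Int)
          ≡ a * q.2 + ((q.1).toNat : Int) [ZMOD (4294967296 : Int)] :=
        (h1.mul_right q.2).add_right _
      have h3 : (pvSgn a * q.2 + ((q.1).toNat : Int)) * pvProd l + pvPoly l
          ≡ (a * q.2 + ((q.1).toNat : Int)) * pvProd l + pvPoly l [ZMOD (4294967296 : Int)] :=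
        (h2.mul_right _).add_right _
      have := h3
      simp only [Int.ModEq] at this
      rw [this]
      congr 1
      simp [pvProd, pvPoly]
      ring

-- B's reversed fold with a running power computes the polynomial exactly.
lemma pv_revfold : ∀ (l : List (Char × Int)) (u p : Int),
    l.reverse.foldl (fun (s : Int × Int) q => (s.1 + ((q.1).toNat : Int) * s.2, s.2 * q.2)) (u, p)
      = (u + pvPoly l * p, p * pvProd l) := by
  intro l
  induction l with
  | nil => intro u p; simp [pvPoly, pvProd]
  | cons q l ih =>
      intro u p
      rw [List.reverse_cons, List.foldl_append, ih u p, List.foldl_cons, List.foldl_nil]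
      refine Prod.ext ?_ ?_ <;> simp [pvPoly, pvProd] <;> ring

-- A's loop (which ignores the range element and walks off by `skip`) is B's pvStep fold over the
-- selected (char, multiplier) pairs, and ends at off + len·skip.
lemma pv_loop_eq (cs : List Char) (m skip : Int) :
    ∀ (L : List Int) (h off : Int),
      L.foldl
        (fun (s : Int × Int) _ =>
          (PySem.Int.bxor
              (PySem.Int.band (s.1 * m + ((PySem.List.pyGetD cs s.2 ' ').toNat : Int)) 4294967295)
              2147483648 - 2147483648,
           s.2 + skip)) (h, off)
      = (((List.range L.length).map
            (fun (i : Nat) => (PySem.List.pyGetD cs (off + (i : Int) * skip) ' ', m))).foldl pvStep h,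
         off + (L.length : Int) * skip) := by
  intro L
  induction L with
  | nil => intro h off; simp
  | cons x L ih =>
      intro h off
      rw [List.foldl_cons, ih, List.length_cons, List.range_succ_eq_map]
      simp only [List.map_cons, List.map_map, List.foldl_cons]
      refine Prod.ext ?_ ?_
      · simp only
        congr 1
        · simp [pvStep]
        · apply List.map_congr_left
          intro i _
          simp only [Function.comp]
          congr 2
          push_cast [Nat.succ_eq_add_one]
          ring
      · simp only
        push_cast
        ring

lemma pv_take_sel (cs : List Char) (k : Nat) (h : k ≤ cs.length) :
    (List.range k).map (fun i => cs.getD i ' ') = cs.take k := by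
  apply List.ext_getElem
  · simp [h]
  · intro i h1 h2
    simp only [List.length_map, List.length_range] at h1
    simp only [List.getElem_map, List.getElem_range, List.getElem_take]
    exact List.getD_eq_getElem cs ' ' (by omega)

-- The first loop's selection is the first k characters paired with 37.
lemma pv_sel1 (cs : List Char) (k : Nat) (hk : k ≤ cs.length) :
    (List.range k).map (fun (i : Nat) => (PySem.List.pyGetD cs (0 + (i : Int) * 1) ' ', (37 : Int)))
      = (cs.take k).map (fun c => (c, (37 : Int))) := by
  rw [← pv_take_sel cs k hk, List.map_map]
  apply List.map_congr_left
  intro i _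
  simp

lemma pv_fold_abs (l : List (Char × Int)) : |l.foldl pvStep 0| = |pvSgn (pvPoly l)| := by
  rw [← pvSgn_zero, pv_fold_sgn, zero_mul, zero_add]

def pvSel (cs : List Char) : List (Char × Int) :=
  (cs.take 15).map (fun c => (c, (37 : Int))) ++
  (if (cs.length : Int) ≥ 16 then
     (List.range (PySem.List.pyRange (cs.length : Int) 15
         (-(PySem.Int.floordiv (cs.length : Int) 16))).length).map
       (fun (i : Nat) =>
         (PySem.List.pyGetD cs (15 + (i : Int) * PySem.Int.floordiv (cs.length : Int) 16) ' ',
          (39 : Int)))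
   else [])

lemma pv_alt_eq (text : String) :
    str_hash_alt text = |pvSgn (pvPoly (pvSel text.toList))| := by
  unfold str_hash_alt pvSel
  set cs := text.toList with hcs
  simp only [PySem.List.len_eq]
  rw [PySem.List.slice_to cs (b := 15) (by norm_num)]
  rw [pv_revfold]
  rw [PySem.Int.mod_eq_emod_of_pos (by norm_num)]
  simp only [zero_add, mul_one, show ((15:Int)).toNat = 15 from rfl]
  unfold pvSgn
  rfl

lemma pv_a_eq (text : String) :
    str_hash text = |(pvSel text.toList).foldl pvStep 0| := by
  unfold str_hash pvSel
  set cs := text.toList with hcs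
  simp only [PySem.List.len_eq]
  by_cases h16 : (cs.length : Int) ≥ 16
  · have hmin : min ((cs.length : Int)) 15 = 15 := by omega
    have h15 : 15 ≤ cs.length := by omega
    simp only [if_pos h16, hmin]
    rw [pv_loop_eq, pv_loop_eq]
    simp only [PySem.List.length_pyRange_neg_one]
    have hc1 : ((15 : Int) - 0).toNat = 15 := by decide
    rw [hc1, pv_sel1 cs 15 h15]
    have hoff : ∀ (i : Nat) (sk : Int),
        (0 : Int) + (15 : Nat) * 1 + (i : Int) * sk = 15 + (i : Int) * sk := by
      intro i sk; push_cast; ring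
    have hsel2 : ∀ (K : Nat) (sk : Int),
        (List.range K).map
            (fun (i : Nat) => (PySem.List.pyGetD cs ((0 : Int) + ((15 : Nat) : Int) * 1 + (i : Int) * sk) ' ', (39 : Int)))
          = (List.range K).map
            (fun (i : Nat) => (PySem.List.pyGetD cs (15 + (i : Int) * sk) ' ', (39 : Int))) := by
      intro K sk
      apply List.map_congr_left
      intro i _
      rw [hoff]
    rw [hsel2]
    rw [List.foldl_append]
  · have hmin : min ((cs.length : Int)) 15 = (cs.length : Int) := by omega
    simp only [if_neg h16, hmin]
    rw [pv_loop_eq]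
    simp only [PySem.List.length_pyRange_neg_one]
    have hc1 : ((cs.length : Int) - 0).toNat = cs.length := by omega
    rw [hc1, pv_sel1 cs cs.length (le_refl _)]
    have htk : cs.take cs.length = cs.take 15 := by
      rw [List.take_of_length_le (le_refl _), List.take_of_length_le (by omega : cs.length ≤ 15)]
    rw [htk]
    simp


-- ===== VERDICT (by name: the statement is the Claim_ definition above) =====
theorem str_hash_spec : Claim_equal_str_hash := by
  intro text _
  unfold Spec_str_hash
  rw [pv_a_eq, pv_alt_eq, pv_fold_abs]
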